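-- pv_equiv track=rewrite | github.com/6ka/totally_balanced_structures | DLC/triangle.py | is_non_pointed_ultrametric_triangle
-- ===== SOURCE A (Python) =====
-- def is_non_pointed_ultrametric_triangle(x, y_1, y_2, matrix):
--     """delta_diss(x, y_1) and delta_diss(x, y_2) properly intersect on x.
--
--     :param x: element of delta_diss
--     :param y_1: element of delta_diss
--     :param y_2: element of delta_diss
--
--     :param delta_diss: delta dissimilarity
--     :type delta_diss: :class:`CTK.diss.Diss`
--
--     :rtype: :class:`bool`
--     """
--     x_y1_without_y2 = False
--     x_y2_without_y1 = False
--     for j in range(len(matrix[x])):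
--         if matrix[x][j] == 1 and matrix[y_1][j] == 1 and matrix[y_2][j] == 0:
--             x_y1_without_y2 = True
--         if matrix[x][j] == 1 and matrix[y_2][j] == 1 and matrix[y_1][j] == 0:
--             x_y2_without_y1 = True
--         if x_y1_without_y2 == x_y2_without_y1 == True:
--             return True
--
--     return False
-- ===== SOURCE B (Python) =====
-- def is_non_pointed_ultrametric_triangle(x, y_1, y_2, matrix):
--     sx = {j for j, v in enumerate(matrix[x]) if v == 1}
--     if not sx:
--         return False
--     sy1 = {j for j, v in enumerate(matrix[y_1]) if v == 1}
--     sy2 = {j for j, v in enumerate(matrix[y_2]) if v == 1}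
--     z1 = {j for j, v in enumerate(matrix[y_1]) if v == 0}
--     z2 = {j for j, v in enumerate(matrix[y_2]) if v == 0}
--     return bool(sx & sy1 & z2) and bool(sx & sy2 & z1)
-- ===== Notes on version B (the rewrite author's own statement) =====
-- stated objective: alternative
-- what changed: Replaces the fused scalar scan with flag state and early return by building index sets of the 1-columns and 0-columns per row and testing two three-way set intersections for non-emptiness (short-circuiting when row x has no 1-columns).
-- outside the precondition, e.g. on is_non_pointed_ultrametric_triangle(0, 1, 2, [[1, 1, 1], [1, 0], [0, 1]]): A returns True, B returns True
import Mathlib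
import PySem

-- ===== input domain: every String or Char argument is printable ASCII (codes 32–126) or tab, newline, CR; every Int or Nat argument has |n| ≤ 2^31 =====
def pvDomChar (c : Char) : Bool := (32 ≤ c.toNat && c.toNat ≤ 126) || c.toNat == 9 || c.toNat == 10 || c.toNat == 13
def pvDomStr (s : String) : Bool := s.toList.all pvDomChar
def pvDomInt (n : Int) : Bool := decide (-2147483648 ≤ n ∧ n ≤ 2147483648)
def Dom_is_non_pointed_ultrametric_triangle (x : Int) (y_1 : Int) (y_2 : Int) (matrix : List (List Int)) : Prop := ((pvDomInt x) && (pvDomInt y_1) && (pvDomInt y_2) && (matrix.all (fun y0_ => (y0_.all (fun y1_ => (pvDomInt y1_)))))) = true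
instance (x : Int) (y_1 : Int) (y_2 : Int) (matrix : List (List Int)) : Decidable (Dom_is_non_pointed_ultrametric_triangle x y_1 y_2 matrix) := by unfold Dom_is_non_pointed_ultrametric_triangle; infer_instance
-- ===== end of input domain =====

-- B replaces A's fused scalar scan (two flags, early return) by per-row index sets of the
-- 1-columns / 0-columns and two three-way set-intersection non-emptiness tests (objective: alternative).

-- ===== PORT A =====
-- matrix[r][j] for a Nat loop index j (Python raises out of range; such inputs are outside Pre_)
def pvAt (r : List Int) (j : Nat) : Int := PySem.List.pyGetD r (j : Int) 0

-- one flag update: 'if cond: flag = True'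
def pvStep (c f : Bool) : Bool := if c then true else f

-- the 'for j in range(len(matrix[x]))' loop of A, with its two flags and early return
def pvLoopA (rx r1 r2 : List Int) (j : Nat) (f1 f2 : Bool) : Bool :=
  if h : j < rx.length then
    if pvStep (pvAt rx j == 1 && pvAt r1 j == 1 && pvAt r2 j == 0) f1 &&
       pvStep (pvAt rx j == 1 && pvAt r2 j == 1 && pvAt r1 j == 0) f2 then true
    else pvLoopA rx r1 r2 (j + 1)
      (pvStep (pvAt rx j == 1 && pvAt r1 j == 1 && pvAt r2 j == 0) f1)
      (pvStep (pvAt rx j == 1 && pvAt r2 j == 1 && pvAt r1 j == 0) f2)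
  else false
  termination_by rx.length - j

def is_non_pointed_ultrametric_triangle (x : Int) (y_1 : Int) (y_2 : Int) (matrix : List (List Int)) : Bool :=
  pvLoopA ((PySem.List.pyGet? matrix x).getD [])
    ((PySem.List.pyGet? matrix y_1).getD [])
    ((PySem.List.pyGet? matrix y_2).getD []) 0 false false

-- ===== PORT B =====
-- {j for j, v in enumerate(row) if v == value}
def pvIdxOf (r : List Int) (v : Int) : PySem.Set Int :=
  PySem.Set.ofList ((PySem.List.enumerate r 0).filterMap (fun p => if p.2 == v then some p.1 else none))

def is_non_pointed_ultrametric_triangle_alt (x : Int) (y_1 : Int) (y_2 : Int) (matrix : List (List Int)) : Bool :=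
  let sx := pvIdxOf ((PySem.List.pyGet? matrix x).getD []) 1
  if sx.isEmpty then false
  else
    let r1 := (PySem.List.pyGet? matrix y_1).getD []
    let r2 := (PySem.List.pyGet? matrix y_2).getD []
    !(PySem.Set.inter (PySem.Set.inter sx (pvIdxOf r1 1)) (pvIdxOf r2 0)).isEmpty &&
      !(PySem.Set.inter (PySem.Set.inter sx (pvIdxOf r2 1)) (pvIdxOf r1 0)).isEmpty

-- ===== PRECONDITION & SPEC =====
-- Pre_ excludes inputs where Python A raises IndexError (an out-of-range row index x, or row x
-- holding a 1 at a column y_1/y_2 lacks while y_1/y_2 are consulted); with ragged rows A can also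
-- return early (True) before reaching such a missing column — those inputs are excluded too, since
-- whether A raises there depends on how far the scan happens to get.
def Pre_is_non_pointed_ultrametric_triangle (x : Int) (y_1 : Int) (y_2 : Int) (matrix : List (List Int)) : Prop :=
  -(matrix.length : Int) ≤ x ∧ x < (matrix.length : Int) ∧
  ((∀ j : Nat, j < ((PySem.List.pyGet? matrix x).getD []).length →
      ((PySem.List.pyGet? matrix x).getD []).getD j 0 ≠ 1) ∨
   (-(matrix.length : Int) ≤ y_1 ∧ y_1 < (matrix.length : Int) ∧
    -(matrix.length : Int) ≤ y_2 ∧ y_2 < (matrix.length : Int) ∧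
    ∀ j : Nat, j < ((PySem.List.pyGet? matrix x).getD []).length →
      ((PySem.List.pyGet? matrix x).getD []).getD j 0 = 1 →
      j < ((PySem.List.pyGet? matrix y_1).getD []).length ∧
      j < ((PySem.List.pyGet? matrix y_2).getD []).length))
instance (x : Int) (y_1 : Int) (y_2 : Int) (matrix : List (List Int)) : Decidable (Pre_is_non_pointed_ultrametric_triangle x y_1 y_2 matrix) := by unfold Pre_is_non_pointed_ultrametric_triangle; infer_instance

def pvWitness_is_non_pointed_ultrametric_triangle : Int × Int × Int × List (List Int) :=
  (0, 1, 2, [[1, 1], [1, 0], [0, 1]])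

def Spec_is_non_pointed_ultrametric_triangle (x : Int) (y_1 : Int) (y_2 : Int) (matrix : List (List Int)) (out : Bool) : Prop := out = is_non_pointed_ultrametric_triangle_alt x y_1 y_2 matrix
instance (x : Int) (y_1 : Int) (y_2 : Int) (matrix : List (List Int)) (out : Bool) : Decidable (Spec_is_non_pointed_ultrametric_triangle x y_1 y_2 matrix out) := by unfold Spec_is_non_pointed_ultrametric_triangle; infer_instance

-- ===== CLAIM (what is proved, stated in full; the proofs are below) =====
def Claim_equal_is_non_pointed_ultrametric_triangle : Prop := ∀ (x : Int) (y_1 : Int) (y_2 : Int) (matrix : List (List Int)), Dom_is_non_pointed_ultrametric_triangle x y_1 y_2 matrix → Pre_is_non_pointed_ultrametric_triangle x y_1 y_2 matrix → Spec_is_non_pointed_ultrametric_triangle x y_1 y_2 matrix (is_non_pointed_ultrametric_triangle x y_1 y_2 matrix)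

-- ===== LEMMAS AND PROOFS =====

lemma pvStep_eq (c f : Bool) : pvStep c f = (c || f) := by
  cases c <;> simp [pvStep]

-- A's loop computes: (f1, or a cond1-column exists from j on) and (f2, or a cond2-column exists from j on)
lemma pvLoopA_eq (rx r1 r2 : List Int) : ∀ (n j : Nat) (f1 f2 : Bool),
    rx.length - j = n → (f1 && f2) = false →
    pvLoopA rx r1 r2 j f1 f2 =
      ((f1 || (List.range' j n).any (fun k => pvAt rx k == 1 && pvAt r1 k == 1 && pvAt r2 k == 0)) &&
       (f2 || (List.range' j n).any (fun k => pvAt rx k == 1 && pvAt r2 k == 1 && pvAt r1 k == 0))) := by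
  intro n
  induction n with
  | zero =>
    intro j f1 f2 hn hf
    have hj : ¬ j < rx.length := by omega
    rw [pvLoopA, dif_neg hj]
    simp [hf]
  | succ n ih =>
    intro j f1 f2 hn hf
    have hj : j < rx.length := by omega
    rw [pvLoopA, dif_pos hj, List.range'_succ, List.any_cons, List.any_cons]
    by_cases hE : (pvStep (pvAt rx j == 1 && pvAt r1 j == 1 && pvAt r2 j == 0) f1 &&
        pvStep (pvAt rx j == 1 && pvAt r2 j == 1 && pvAt r1 j == 0) f2) = true
    · rw [if_pos hE]
      simp only [pvStep_eq, Bool.and_eq_true, Bool.or_eq_true] at hE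
      rcases hE with ⟨hE1 | hE1, hE2 | hE2⟩ <;> simp [hE1, hE2]
    · have hE' : (pvStep (pvAt rx j == 1 && pvAt r1 j == 1 && pvAt r2 j == 0) f1 &&
          pvStep (pvAt rx j == 1 && pvAt r2 j == 1 && pvAt r1 j == 0) f2) = false := by
        simpa using hE
      rw [if_neg hE, ih (j + 1) _ _ (by omega) hE']
      simp only [pvStep_eq]
      cases (pvAt rx j == 1 && pvAt r1 j == 1 && pvAt r2 j == 0) <;>
      cases (pvAt rx j == 1 && pvAt r2 j == 1 && pvAt r1 j == 0) <;>
      cases f1 <;> cases f2 <;> simp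

-- membership in the filterMap over enumerate underlying pvIdxOf
lemma mem_fm (v : Int) : ∀ (r : List Int) (s a : Int),
    a ∈ (PySem.List.enumerate r s).filterMap (fun p => if p.2 == v then some p.1 else none) ↔
      ∃ k : Nat, k < r.length ∧ r.getD k 0 = v ∧ a = s + k := by
  intro r
  induction r with
  | nil => intro s a; simp [PySem.List.enumerate]
  | cons hd tl ih =>
    intro s a
    rw [PySem.List.enumerate_cons, List.filterMap_cons]
    by_cases hv : hd = v
    · simp only [hv, BEq.rfl, if_pos, List.mem_cons, ih]
      constructor
      · rintro (rfl | ⟨k, hk, hget, rfl⟩)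
        · exact ⟨0, by simp⟩
        · exact ⟨k + 1, by simp only [List.length_cons]; omega, by simpa using hget, by push_cast; ring⟩
      · rintro ⟨k, hk, hget, rfl⟩
        cases k with
        | zero => left; simp
        | succ k =>
          right
          exact ⟨k, by simp only [List.length_cons] at hk; omega, by simpa using hget, by push_cast; ring⟩
    · have hb : (hd == v) = false := by simp [hv]
      simp only [hb, Bool.false_eq_true, if_false, ih]
      constructor
      · rintro ⟨k, hk, hget, rfl⟩
        exact ⟨k + 1, by simp only [List.length_cons]; omega, by simpa using hget, by push_cast; ring⟩
      · rintro ⟨k, hk, hget, rfl⟩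
        cases k with
        | zero => exact absurd (by simpa using hget) hv
        | succ k =>
          exact ⟨k, by simp only [List.length_cons] at hk; omega, by simpa using hget, by push_cast; ring⟩

lemma mem_pvIdxOf (r : List Int) (v a : Int) :
    a ∈ pvIdxOf r v ↔ ∃ k : Nat, k < r.length ∧ r.getD k 0 = v ∧ a = k := by
  unfold pvIdxOf
  rw [PySem.Set.mem_ofList, mem_fm]
  simp

-- one intersection-non-emptiness test of B equals the corresponding 'any' of A's loop
lemma pvConj_eq (rx r1 r2 : List Int)
    (h : ∀ k : Nat, k < rx.length → rx.getD k 0 = 1 → k < r1.length ∧ k < r2.length) :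
    (!(PySem.Set.inter (PySem.Set.inter (pvIdxOf rx 1) (pvIdxOf r1 1)) (pvIdxOf r2 0)).isEmpty) =
      (List.range rx.length).any (fun k => pvAt rx k == 1 && pvAt r1 k == 1 && pvAt r2 k == 0) := by
  rw [Bool.eq_iff_iff]
  simp only [Bool.not_eq_true', List.isEmpty_eq_false_iff_exists_mem, List.any_eq_true,
    PySem.Set.mem_inter, mem_pvIdxOf, List.mem_range, pvAt, PySem.List.pyGetD_natCast,
    Bool.and_eq_true, beq_iff_eq]
  constructor
  · rintro ⟨a, ⟨⟨kx, hkx, hx, ha⟩, ⟨k1, hk1, hv1, he1⟩⟩, ⟨k2, hk2, hv2, he2⟩⟩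
    have e1 : k1 = kx := by omega
    have e2 : k2 = kx := by omega
    rw [e1] at hv1
    rw [e2] at hv2
    exact ⟨kx, hkx, ⟨hx, hv1⟩, hv2⟩
  · rintro ⟨k, hk, ⟨hx, h1v⟩, h2v⟩
    exact ⟨(k : Int), ⟨⟨k, hk, hx, rfl⟩, ⟨k, (h k hk hx).1, h1v, rfl⟩⟩, ⟨k, (h k hk hx).2, h2v, rfl⟩⟩

-- with no 1-column in rx, each 'any' of A's loop is false
lemma pvAny_false (rx : List Int) (f g : Nat → Bool)
    (h : ∀ j : Nat, j < rx.length → rx.getD j 0 ≠ 1) :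
    (List.range rx.length).any (fun k => pvAt rx k == 1 && f k && g k) = false := by
  rw [List.any_eq_false]
  intro k hk
  rw [List.mem_range] at hk
  simp only [pvAt, PySem.List.pyGetD_natCast, Bool.and_eq_true, beq_iff_eq, not_and]
  intro h1
  exact absurd h1.1 (h k hk)

-- with no 1-column in rx, B's sx is empty
lemma pvIdxOf_nil (rx : List Int) (h : ∀ j : Nat, j < rx.length → rx.getD j 0 ≠ 1) :
    pvIdxOf rx 1 = [] := by
  rw [List.eq_nil_iff_forall_not_mem]
  intro a ha
  rw [mem_pvIdxOf] at ha
  obtain ⟨k, hk, hv, _⟩ := ha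
  exact h k hk hv

-- ===== VERDICT (by name: the statement is the Claim_ definition above) =====
theorem is_non_pointed_ultrametric_triangle_spec : Claim_equal_is_non_pointed_ultrametric_triangle := by
  intro x y_1 y_2 matrix _ hpre
  obtain ⟨_, _, hrest⟩ := hpre
  unfold Spec_is_non_pointed_ultrametric_triangle
  unfold is_non_pointed_ultrametric_triangle is_non_pointed_ultrametric_triangle_alt
  set rx := (PySem.List.pyGet? matrix x).getD [] with hrx
  set r1 := (PySem.List.pyGet? matrix y_1).getD [] with hr1
  set r2 := (PySem.List.pyGet? matrix y_2).getD [] with hr2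
  show pvLoopA rx r1 r2 0 false false =
    (if (pvIdxOf rx 1).isEmpty then false
     else
      !(PySem.Set.inter (PySem.Set.inter (pvIdxOf rx 1) (pvIdxOf r1 1)) (pvIdxOf r2 0)).isEmpty &&
        !(PySem.Set.inter (PySem.Set.inter (pvIdxOf rx 1) (pvIdxOf r2 1)) (pvIdxOf r1 0)).isEmpty)
  rw [pvLoopA_eq rx r1 r2 rx.length 0 false false (by omega) rfl]
  rcases hrest with hno1 | ⟨_, _, _, _, hsafe⟩
  · rw [pvIdxOf_nil rx hno1]
    simp only [← List.range_eq_range']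
    rw [pvAny_false rx _ _ hno1, pvAny_false rx _ _ hno1]
    simp
  · rw [pvConj_eq rx r1 r2 hsafe,
      pvConj_eq rx r2 r1 (fun k hk hx => (hsafe k hk hx).symm)]
    by_cases hsx : (pvIdxOf rx 1).isEmpty
    · rw [if_pos hsx]
      rw [List.isEmpty_iff] at hsx
      have hno1 : ∀ j : Nat, j < rx.length → rx.getD j 0 ≠ 1 := by
        intro j hj hv
        have : (j : Int) ∈ pvIdxOf rx 1 := (mem_pvIdxOf rx 1 j).mpr ⟨j, hj, hv, rfl⟩
        rw [hsx] at this
        exact absurd this (List.not_mem_nil)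
      simp only [← List.range_eq_range']
      rw [pvAny_false rx _ _ hno1, pvAny_false rx _ _ hno1]
      simp
    · rw [if_neg hsx]
      simp [List.range_eq_range']
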